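/- GENERATED by farm/mkstatement.py from design/units.tsv (unit `decode_all.5`) and the assertions of Vorbis/Spec/DecodeAll.lean — do not edit.
   THE STATEMENT of the proof unit `decode_all.5`: segment 5 of `decode_all` (6 instructions; entries 0x103640;
   exits 0x103658; ranges 0x103640-0x103653)
   takes each of its entry assertions to one of its exit assertions (`Vorbis.Spec.decode_all.Seg5`), given the contracts of its callees.
   What the names mean: Vorbis/Spec/Basic.lean (the shared hypotheses), Vorbis/Spec/DecodeAll.lean (the assertions). The theorem to prove:
   `theorem decode_all_5_ok : Vorbis.Spec.decode_all_5.Statement`. -/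
import Vorbis.Spec.Alloc
import Vorbis.Spec.DecodeAll
namespace Vorbis.Spec.decode_all_5
open X86 X86.User Asan

/-- The statement of unit `decode_all.5`. -/
def Statement : Prop :=
  ∀ (Lay : Layout) (_hLay : Lay.hi = 0x1000000) (μ : Microarch) (_hμ : UserX.MicroOK μ) (u₀ : State)
    (_hcode : HasCodeNat Lay u₀ Vorbis.L.decode_all.entry Vorbis.Code.code_decode_all.nat Vorbis.L.decode_all.size)
    (_h_stb_vorbis_get_error : ∀ (others : List Obj) (frames : List (Nat × FrameLayout)), Calls Lay μ Vorbis.WayInv (Vorbis.conv u₀) Vorbis.L.stb_vorbis_get_error.entry (Vorbis.Spec.stb_vorbis_get_error.spec others frames))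
    (_h_stb_vorbis_close : ∀ (others : List Obj) (frames : List (Nat × FrameLayout)) (Blk : Block → Prop), Calls Lay μ Vorbis.WayInv (Vorbis.conv u₀) Vorbis.L.stb_vorbis_close.entry (Vorbis.Spec.stb_vorbis_close.spec others frames Blk)),
    Vorbis.Spec.decode_all.Seg5 Lay μ u₀

end Vorbis.Spec.decode_all_5
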